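-- pv_equiv track=rewrite | github.com/rusliksu/tm-advisor | scripts/tm_advisor/analysis.py | _normalize_strategy_tags
-- ===== SOURCE A (Python) =====
-- def _normalize_strategy_tags(tag_map) -> dict[str, int]:
--     normalized: dict[str, int] = {}
--     if not isinstance(tag_map, dict):
--         return normalized
--
--     for raw_tag, raw_value in tag_map.items():
--         if not raw_tag or not isinstance(raw_value, (int, float)):
--             continue
--         tag = str(raw_tag).strip()
--         if not tag:
--             continue
--         normalized_tag = tag[0].upper() + tag[1:].lower()
--         normalized[normalized_tag] = max(normalized.get(normalized_tag, 0), int(raw_value))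
--     return normalized
-- ===== SOURCE B (Python) =====
-- def _normalize_strategy_tags(tag_map) -> dict[str, int]:
--     if not isinstance(tag_map, dict):
--         return {}
--     groups: dict[str, list[int]] = {}
--     for raw_tag, raw_value in tag_map.items():
--         if not raw_tag or not isinstance(raw_value, (int, float)):
--             continue
--         tag = str(raw_tag).strip()
--         if not tag:
--             continue
--         key = tag[0].upper() + tag[1:].lower()
--         groups.setdefault(key, []).append(int(raw_value))
--     return {key: max(0, *vals) for key, vals in groups.items()}
-- ===== Notes on version B (the rewrite author's own statement) =====
-- stated objective: alternative
-- what changed: replaces A's single-pass streaming running-max dict update with a two-pass group-then-reduce: B first collects each normalized tag's int values into per-tag lists (setdefault/append), then builds the result as max(0, *values) per group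
import Mathlib
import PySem

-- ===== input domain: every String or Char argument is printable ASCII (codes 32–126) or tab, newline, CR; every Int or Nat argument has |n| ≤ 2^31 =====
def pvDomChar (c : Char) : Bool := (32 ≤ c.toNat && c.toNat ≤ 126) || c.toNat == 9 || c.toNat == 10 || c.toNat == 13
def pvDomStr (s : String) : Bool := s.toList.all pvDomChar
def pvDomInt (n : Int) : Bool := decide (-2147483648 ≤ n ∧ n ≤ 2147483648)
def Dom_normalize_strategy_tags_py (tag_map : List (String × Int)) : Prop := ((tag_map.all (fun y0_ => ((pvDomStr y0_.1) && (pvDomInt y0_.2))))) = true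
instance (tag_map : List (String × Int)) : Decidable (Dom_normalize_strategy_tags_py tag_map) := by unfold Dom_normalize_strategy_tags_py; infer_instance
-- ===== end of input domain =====

-- B replaces A's streaming running-max dict updates with a two-pass group-then-reduce
-- (collect each normalized tag's values, then take max(0, *values)); objective: alternative.

-- ===== PORT A =====
-- literal port of A: one pass, normalized[tag] = max(normalized.get(tag, 0), int(v))
def normalize_strategy_tags_py (tag_map : List (String × Int)) : List (String × Int) :=
  ((PySem.Dict.ofList tag_map).items.foldl
    (fun (normalized : PySem.Dict String Int) p =>
      if p.1 = "" then normalized            -- `if not raw_tag ... : continue` (values are always int here)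
      else
        match (PySem.Str.strip p.1).toList with
        | [] => normalized                   -- `if not tag: continue`
        | c :: rest =>                       -- tag[0].upper() + tag[1:].lower()
          let nt := String.ofList (PySem.Chars.upperChar c :: PySem.Chars.lower rest)
          normalized.insert nt (max (normalized.getD nt 0) p.2))
    PySem.Dict.empty).items

-- ===== PORT B =====
-- B-side helper: the normalized tag, or none when the stripped tag is empty
def pvNormTag (t : String) : Option String :=
  match (PySem.Str.strip t).toList with
  | [] => none
  | c :: rest => some (String.ofList (PySem.Chars.upperChar c :: PySem.Chars.lower rest))

def normalize_strategy_tags_py_alt (tag_map : List (String × Int)) : List (String × Int) :=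
  let groups := (PySem.Dict.ofList tag_map).items.foldl
    (fun (g : PySem.Dict String (List Int)) p =>
      if p.1 = "" then g
      else
        match pvNormTag p.1 with
        | none => g
        | some nt => g.modify nt [] (· ++ [p.2]))   -- groups.setdefault(key, []).append(v)
    PySem.Dict.empty
  groups.items.map (fun q => (q.1, q.2.foldl max 0))  -- max(0, *vals)

-- ===== PRECONDITION & SPEC =====
def Spec_normalize_strategy_tags_py (tag_map : List (String × Int)) (out : List (String × Int)) : Prop := out = normalize_strategy_tags_py_alt tag_map
instance (tag_map : List (String × Int)) (out : List (String × Int)) : Decidable (Spec_normalize_strategy_tags_py tag_map out) := by unfold Spec_normalize_strategy_tags_py; infer_instance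

-- ===== CLAIM (what is proved, stated in full; the proofs are below) =====
def Claim_equal_normalize_strategy_tags_py : Prop := ∀ (tag_map : List (String × Int)), Dom_normalize_strategy_tags_py tag_map → Spec_normalize_strategy_tags_py tag_map (normalize_strategy_tags_py tag_map)

-- ===== LEMMAS AND PROOFS =====

-- the valid (normalized tag, value) pairs a loop body acts on
def pvValid (p : String × Int) : Option (String × Int) :=
  (pvNormTag p.1).map (fun nt => (nt, p.2))

def pvStepA (d : PySem.Dict String Int) (q : String × Int) : PySem.Dict String Int :=
  d.insert q.1 (max (d.getD q.1 0) q.2)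

def pvStepB (g : PySem.Dict String (List Int)) (q : String × Int) : PySem.Dict String (List Int) :=
  g.modify q.1 [] (· ++ [q.2])

lemma pvNormTag_empty : pvNormTag "" = none := by decide

lemma pvBodyA (d : PySem.Dict String Int) (p : String × Int) :
    (if p.1 = "" then d
     else
       match (PySem.Str.strip p.1).toList with
       | [] => d
       | c :: rest =>
         let nt := String.ofList (PySem.Chars.upperChar c :: PySem.Chars.lower rest)
         d.insert nt (max (d.getD nt 0) p.2))
    = (match pvValid p with | none => d | some q => pvStepA d q) := by
  unfold pvValid pvNormTag
  cases h : (PySem.Str.strip p.1).toList with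
  | nil => simp
  | cons c rest =>
    have hp : ¬ p.1 = "" := by
      intro hp
      rw [hp] at h
      have h0 : (PySem.Str.strip "").toList = [] := by decide
      rw [h0] at h
      simp at h
    rw [if_neg hp]
    rfl

lemma pvBodyB (g : PySem.Dict String (List Int)) (p : String × Int) :
    (if p.1 = "" then g
     else
       match pvNormTag p.1 with
       | none => g
       | some nt => g.modify nt [] (· ++ [p.2]))
    = (match pvValid p with | none => g | some q => pvStepB g q) := by
  unfold pvValid
  cases h : pvNormTag p.1 with
  | none => simp
  | some nt =>
    have hp : ¬ p.1 = "" := by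
      intro hp
      rw [hp, pvNormTag_empty] at h
      simp at h
    rw [if_neg hp]
    rfl

lemma pvFoldA_eq (l : List (String × Int)) (d : PySem.Dict String Int) :
    l.foldl
      (fun (normalized : PySem.Dict String Int) p =>
        if p.1 = "" then normalized
        else
          match (PySem.Str.strip p.1).toList with
          | [] => normalized
          | c :: rest =>
            let nt := String.ofList (PySem.Chars.upperChar c :: PySem.Chars.lower rest)
            normalized.insert nt (max (normalized.getD nt 0) p.2)) d
    = (l.filterMap pvValid).foldl pvStepA d := by
  induction l generalizing d with
  | nil => rfl
  | cons p l ih =>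
    rw [List.foldl_cons, List.filterMap_cons, pvBodyA]
    cases hv : pvValid p with
    | none => exact ih d
    | some q => exact ih _

lemma pvFoldB_eq (l : List (String × Int)) (g : PySem.Dict String (List Int)) :
    l.foldl
      (fun (g : PySem.Dict String (List Int)) p =>
        if p.1 = "" then g
        else
          match pvNormTag p.1 with
          | none => g
          | some nt => g.modify nt [] (· ++ [p.2])) g
    = (l.filterMap pvValid).foldl pvStepB g := by
  induction l generalizing g with
  | nil => rfl
  | cons p l ih =>
    rw [List.foldl_cons, List.filterMap_cons, pvBodyB]
    cases hv : pvValid p with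
    | none => exact ih g
    | some q => exact ih _

lemma pvGetD_inv (l : List (String × Int)) (d : PySem.Dict String Int)
    (g : PySem.Dict String (List Int))
    (h : ∀ k, d.getD k 0 = (g.getD k []).foldl max 0) (k : String) :
    (l.foldl pvStepA d).getD k 0 = ((l.foldl pvStepB g).getD k []).foldl max 0 := by
  induction l generalizing d g with
  | nil => exact h k
  | cons q l ih =>
    simp only [List.foldl_cons]
    refine ih _ _ (fun k' => ?_)
    simp only [pvStepA, pvStepB, PySem.Dict.getD_insert, PySem.Dict.getD_modify]
    by_cases hk : k' = q.1
    · simp [hk, List.foldl_append, h q.1]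
    · simp [hk, h k']

lemma pvKeys_eq (l : List (String × Int)) :
    (l.foldl pvStepA PySem.Dict.empty).keys
      = (l.foldl pvStepB PySem.Dict.empty).keys := by
  have hA := PySem.Dict.keys_foldl_insert_key l (·.1)
      (fun d (q : String × Int) => max (d.getD q.1 0) q.2) PySem.Dict.empty
  have hB := PySem.Dict.keys_foldl_modify_key l (·.1) []
      (fun (_ : PySem.Dict String (List Int)) (q : String × Int) => (· ++ [q.2]))
      PySem.Dict.empty
  simpa [pvStepA, pvStepB, PySem.Dict.keys_empty] using hA.trans hB.symm

theorem pvMain (l : List (String × Int)) :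
    (l.foldl pvStepA PySem.Dict.empty).items
      = ((l.foldl pvStepB PySem.Dict.empty).items).map
          (fun q => (q.1, q.2.foldl max 0)) := by
  have hndA : (l.foldl pvStepA PySem.Dict.empty).keys.Nodup := by
    have := PySem.Dict.nodup_keys_foldl_insert_key l (·.1)
      (fun d (q : String × Int) => max (d.getD q.1 0) q.2) PySem.Dict.empty
      (by simp)
    simpa [pvStepA] using this
  have hndB : (l.foldl pvStepB PySem.Dict.empty).keys.Nodup := by
    have := PySem.Dict.nodup_keys_foldl_modify_key l (·.1) []
      (fun (_ : PySem.Dict String (List Int)) (q : String × Int) => (· ++ [q.2]))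
      PySem.Dict.empty (by simp)
    simpa [pvStepB] using this
  rw [PySem.Dict.items_eq_map_keys _ hndA 0, PySem.Dict.items_eq_map_keys _ hndB []]
  rw [List.map_map, pvKeys_eq]
  refine List.map_congr_left fun k _ => ?_
  have h := pvGetD_inv l PySem.Dict.empty PySem.Dict.empty
    (fun k => by simp [PySem.Dict.getD_empty]) k
  simp [Function.comp, h]

-- ===== VERDICT (by name: the statement is the Claim_ definition above) =====
theorem normalize_strategy_tags_py_spec : Claim_equal_normalize_strategy_tags_py := by
  intro tag_map _
  unfold Spec_normalize_strategy_tags_py normalize_strategy_tags_py normalize_strategy_tags_py_alt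
  rw [pvFoldA_eq, pvFoldB_eq]
  exact pvMain _
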